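-- pv_equiv track=rewrite | github.com/SSSRC/HIROGARI_PASS_PREDICTION | shimcham-win.py | judge_round
-- ===== SOURCE A (Python) =====
-- def judge_round(az_rise, az_set, az_max):
--     flag_round = False
--
--     parameter = az_rise
--     distance = 0
--     while(parameter != az_max):
--         parameter += 1
--         distance += 1
--         if parameter >= 360:
--             parameter -= 360
--     if distance <= 180:
--         flag_clockwise = True
--     else:
--         flag_clockwise = False
--     parameter = az_rise
--     while(parameter != az_set):
--         if flag_clockwise:
--             parameter += 1
--         else:
--             parameter -= 1
--         if parameter >= 360:
--             parameter -= 360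
--         elif parameter < 0:
--             parameter += 360
--         if parameter > 160 and parameter < 165:
--             flag_round = True
--             break
--
--     return flag_round
-- ===== SOURCE B (Python) =====
-- def judge_round(az_rise, az_set, az_max):
--     distance = (az_max - az_rise) % 360
--     d = 1 if distance <= 180 else -1
--     n = ((az_set - az_rise) * d) % 360
--     return any(1 <= ((t - az_rise) * d) % 360 <= n for t in (161, 162, 163, 164))
-- ===== Notes on version B (the rewrite author's own statement) =====
-- stated objective: simpler
-- what changed: Replaced both degree-by-degree stepping loops with direct modular arithmetic: the traversal direction comes from (az_max-az_rise)%360<=180 and the answer from comparing the modular step-counts of the four candidate angles 161..164 against the step-count of az_set.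
-- outside the precondition, e.g. on judge_round(1000, 100, 200): A returns True, B returns True; on judge_round(-31, -3132, 4): A returns True, B returns False; on judge_round(0, 1, 360): A does not finish within the time limit, B returns False
import Mathlib
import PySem

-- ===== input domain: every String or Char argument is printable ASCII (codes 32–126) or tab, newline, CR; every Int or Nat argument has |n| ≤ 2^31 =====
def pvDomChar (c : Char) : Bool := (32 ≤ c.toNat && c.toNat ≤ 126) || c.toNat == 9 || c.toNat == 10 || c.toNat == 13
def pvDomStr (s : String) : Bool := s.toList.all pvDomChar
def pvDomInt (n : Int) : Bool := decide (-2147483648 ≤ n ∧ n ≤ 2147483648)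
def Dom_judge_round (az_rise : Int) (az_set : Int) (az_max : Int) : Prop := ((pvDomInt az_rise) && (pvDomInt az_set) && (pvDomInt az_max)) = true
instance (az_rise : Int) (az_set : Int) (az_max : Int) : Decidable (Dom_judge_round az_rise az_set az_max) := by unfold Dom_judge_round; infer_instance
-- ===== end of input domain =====

-- B replaces A's two degree-by-degree stepping loops by direct modular arithmetic over the
-- four candidate angles 161..164 (objective: simpler).


-- ===== PORT A =====
-- A's first while loop (counts single-degree steps from `parameter` to az_max, wrapping at 360).
-- The loop may diverge in Python on inputs outside [0,360); fuel is only a totality guard: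
-- inside Pre_judge_round at most 359 iterations run, so fuel 360 is never exhausted there.
def judgeRoundDistLoop (fuel : Nat) (parameter : Int) (distance : Int) (az_max : Int) : Int :=
  match fuel with
  | 0 => distance
  | f + 1 =>
    if parameter = az_max then distance
    else
      let p := parameter + 1
      let d := distance + 1
      let p := if p ≥ 360 then p - 360 else p
      judgeRoundDistLoop f p d az_max

-- A's second while loop: step one degree toward az_set (direction by flag_clockwise, wrapping),
-- returning True as soon as 160 < parameter < 165. Same fuel remark as above.
def judgeRoundScanLoop (fuel : Nat) (parameter : Int) (az_set : Int) (flag_clockwise : Bool) : Bool :=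
  match fuel with
  | 0 => false
  | f + 1 =>
    if parameter = az_set then false
    else
      let p := if flag_clockwise then parameter + 1 else parameter - 1
      let p := if p ≥ 360 then p - 360 else if p < 0 then p + 360 else p
      if 160 < p ∧ p < 165 then true
      else judgeRoundScanLoop f p az_set flag_clockwise

def judge_round (az_rise : Int) (az_set : Int) (az_max : Int) : Bool :=
  let distance := judgeRoundDistLoop 360 az_rise 0 az_max
  let flag_clockwise := distance ≤ 180
  judgeRoundScanLoop 360 az_rise az_set flag_clockwise

-- ===== PORT B =====
def judge_round_alt (az_rise : Int) (az_set : Int) (az_max : Int) : Bool :=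
  let distance := PySem.Int.mod (az_max - az_rise) 360
  let d : Int := if distance ≤ 180 then 1 else -1
  let n := PySem.Int.mod ((az_set - az_rise) * d) 360
  [(161 : Int), 162, 163, 164].any (fun t =>
    decide (1 ≤ PySem.Int.mod ((t - az_rise) * d) 360 ∧ PySem.Int.mod ((t - az_rise) * d) 360 ≤ n))

-- ===== PRECONDITION & SPEC =====
-- Pre_ excludes azimuths outside [0,360), the degree range the function is meant for: there A's
-- one-degree stepping loops diverge on most inputs (e.g. az_max = 360 is never reached), and where
-- they do return, the value is an artefact of the partial wrap-around adjustments on out-of-range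
-- degrees, which B's modular arithmetic does not reproduce.
def Pre_judge_round (az_rise : Int) (az_set : Int) (az_max : Int) : Prop :=
  (0 ≤ az_rise ∧ az_rise < 360) ∧ (0 ≤ az_set ∧ az_set < 360) ∧ (0 ≤ az_max ∧ az_max < 360)
instance (az_rise : Int) (az_set : Int) (az_max : Int) : Decidable (Pre_judge_round az_rise az_set az_max) := by unfold Pre_judge_round; infer_instance

def pvWitness_judge_round : Int × Int × Int := (100, 200, 150)

def Spec_judge_round (az_rise : Int) (az_set : Int) (az_max : Int) (out : Bool) : Prop := out = judge_round_alt az_rise az_set az_max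
instance (az_rise : Int) (az_set : Int) (az_max : Int) (out : Bool) : Decidable (Spec_judge_round az_rise az_set az_max out) := by unfold Spec_judge_round; infer_instance

-- ===== CLAIM (what is proved, stated in full; the proofs are below) =====
def Claim_equal_judge_round : Prop := ∀ (az_rise : Int) (az_set : Int) (az_max : Int), Dom_judge_round az_rise az_set az_max → Pre_judge_round az_rise az_set az_max → Spec_judge_round az_rise az_set az_max (judge_round az_rise az_set az_max)

-- ===== LEMMAS AND PROOFS =====

-- step count from p to t in direction cw (clockwise = +1), one degree per step, mod 360
def pvSteps (cw : Bool) (p t : Int) : Int := (if cw then t - p else p - t) % 360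

lemma distLoop_eq (f : Nat) (p d m : Int) (hp : 0 ≤ p ∧ p < 360) (hm : 0 ≤ m ∧ m < 360)
    (hf : (m - p) % 360 ≤ (f : Int)) :
    judgeRoundDistLoop f p d m = d + (m - p) % 360 := by
  induction f generalizing p d with
  | zero =>
    simp only [judgeRoundDistLoop]
    omega
  | succ f ih =>
    simp only [judgeRoundDistLoop]
    by_cases h : p = m
    · rw [if_pos h]; subst h; simp
    · simp only [if_neg h]
      by_cases hw : p + 1 ≥ 360
      · rw [if_pos hw, ih (p + 1 - 360) (d + 1) (by omega) (by omega)]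
        omega
      · rw [if_neg hw, ih (p + 1) (d + 1) (by omega) (by omega)]
        omega

-- B's check at a fixed target angle
def pvHit1 (cw : Bool) (p s t : Int) : Bool :=
  decide (1 ≤ pvSteps cw p t ∧ pvSteps cw p t ≤ pvSteps cw p s)

def pvHit (cw : Bool) (p s : Int) : Bool :=
  pvHit1 cw p s 161 || pvHit1 cw p s 162 || pvHit1 cw p s 163 || pvHit1 cw p s 164

lemma scanLoop_eq (f : Nat) (p s : Int) (cw : Bool) (hp : 0 ≤ p ∧ p < 360) (hs : 0 ≤ s ∧ s < 360)
    (hf : pvSteps cw p s ≤ (f : Int)) :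
    judgeRoundScanLoop f p s cw = pvHit cw p s := by
  induction f generalizing p with
  | zero =>
    simp only [judgeRoundScanLoop, pvHit, pvHit1, pvSteps] at *
    cases cw <;> simp_all <;> omega
  | succ f ih =>
    simp only [judgeRoundScanLoop]
    by_cases h : p = s
    · subst h
      have h0 : pvSteps cw p p = 0 := by unfold pvSteps; cases cw <;> simp
      simp only [pvHit, pvHit1, h0]
      simp; omega
    · simp only [if_neg h]
      have hps : 1 ≤ pvSteps cw p s ∧ pvSteps cw p s < 360 := by
        unfold pvSteps; cases cw <;> simp only [Bool.false_eq_true, if_true, if_false] <;> omega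
      -- the stepped parameter
      set p1 := if cw then p + 1 else p - 1 with hp1
      set p' := if p1 ≥ 360 then p1 - 360 else if p1 < 0 then p1 + 360 else p1 with hp'
      have hp'b : 0 ≤ p' ∧ p' < 360 := by
        cases cw <;> simp [hp1] at hp' <;> omega
      have hstep : ∀ t : Int, pvSteps cw p t = 0 → pvSteps cw p' t = 359 := by
        intro t ht
        unfold pvSteps at *
        cases cw <;> simp only [Bool.false_eq_true, if_true, if_false] at * <;>
          simp [hp1] at hp' <;> omega
      have hstep1 : ∀ t : Int, 1 ≤ pvSteps cw p t → pvSteps cw p' t = pvSteps cw p t - 1 := by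
        intro t ht
        unfold pvSteps at *
        cases cw <;> simp only [Bool.false_eq_true, if_true, if_false] at * <;>
          simp [hp1] at hp' <;> omega
      have hone : pvSteps cw p p' = 1 := by
        unfold pvSteps
        cases cw <;> simp only [Bool.false_eq_true, if_true, if_false] <;>
          simp [hp1] at hp' <;> omega
      by_cases hw : 160 < p' ∧ p' < 165
      · rw [if_pos hw]
        -- p' itself is one of 161..164 reached in 1 ≤ steps ≤ steps-to-s
        have : pvHit1 cw p s p' = true := by
          simp only [pvHit1, hone, decide_eq_true_eq]
          omega
        simp only [pvHit]
        rcases (by omega : p' = 161 ∨ p' = 162 ∨ p' = 163 ∨ p' = 164) with h'|h'|h'|h' <;>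
          rw [h'] at this <;> simp [this]
      · rw [if_neg hw]
        have hrec := ih p' hp'b (by have := hstep1 s hps.1; omega)
        rw [hrec]
        -- hit sets agree: for each target t ∈ {161..164}, t ≠ p', and the condition shifts by 1
        have key : ∀ t : Int, 160 < t → t < 165 → pvHit1 cw p' s t = pvHit1 cw p s t := by
          intro t h1 h2
          have htp' : t ≠ p' := by omega
          have hsb : 0 ≤ pvSteps cw p t ∧ pvSteps cw p t < 360 := by
            unfold pvSteps; cases cw <;> simp only [Bool.false_eq_true, if_true, if_false] <;> omega
          by_cases h0 : pvSteps cw p t = 0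
          · have h359 := hstep t h0
            simp only [pvHit1, h0, h359, hstep1 s hps.1]
            have : pvSteps cw p s < 360 := hps.2
            simp; omega
          · have h1' : 1 ≤ pvSteps cw p t := by omega
            have ht' := hstep1 t h1'
            -- steps ≠ 1 since t ≠ p'
            have hne1 : pvSteps cw p t ≠ 1 := by
              intro hc
              apply htp'
              have := hone
              unfold pvSteps at hc this
              cases cw <;> simp only [Bool.false_eq_true, if_true, if_false] at hc this <;>
                simp [hp1] at hp' <;> omega
            simp only [pvHit1, ht', hstep1 s hps.1]
            rw [decide_eq_decide]
            omega
        simp only [pvHit, key 161 (by omega) (by omega), key 162 (by omega) (by omega),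
          key 163 (by omega) (by omega), key 164 (by omega) (by omega)]

lemma alt_eq_hit (r s m : Int) :
    judge_round_alt r s m = pvHit ((m - r) % 360 ≤ 180) r s := by
  unfold judge_round_alt pvHit pvHit1 pvSteps
  have hmod : ∀ a : Int, PySem.Int.mod a 360 = a % 360 := fun a =>
    PySem.Int.mod_eq_emod_of_pos (by norm_num)
  simp only [hmod, List.any_cons, List.any_nil, Bool.or_false]
  by_cases hc : (m - r) % 360 ≤ 180 <;>
    simp [Bool.or_assoc, mul_comm, sub_eq_add_neg]

-- ===== VERDICT (by name: the statement is the Claim_ definition above) =====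
theorem judge_round_spec : Claim_equal_judge_round := by
  intro r s m _ hpre
  obtain ⟨hr, hs, hm⟩ := hpre
  unfold Spec_judge_round judge_round
  have hd : judgeRoundDistLoop 360 r 0 m = 0 + (m - r) % 360 :=
    distLoop_eq 360 r 0 m hr hm (by omega)
  rw [hd, alt_eq_hit r s m]
  simp only [zero_add]
  exact scanLoop_eq 360 r s _ hr hs (by unfold pvSteps; split <;> omega)
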